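-- pv_equiv track=rewrite | github.com/sang-hwan/trade-bot | strategy/stop_donchian.py | donchian_stop_hits
-- ===== SOURCE A (Python) =====
-- from collections import deque
--
-- def donchian_prev_low(lows, n):
--     if n <= 0:
--         raise ValueError("n must be positive")
--     m = len(lows)
--     out = [None] * m
--     dq = deque()
--     for i in range(m):
--         v = lows[i]
--         while dq and dq[-1][1] >= v:
--             dq.pop()
--         dq.append((i, v))
--         while dq and dq[0][0] <= i - n:
--             dq.popleft()
--         t = i + 1
--         if t < m and i >= n - 1:
--             out[t] = dq[0][1]
--     return out
--
-- def donchian_stop_hits(lows, n):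
--     prev = donchian_prev_low(lows, n)
--     m = len(lows)
--     hits = [False] * m
--     for t in range(m):
--         p = prev[t]
--         if p is not None and lows[t] <= p:
--             hits[t] = True
--     return hits
-- ===== SOURCE B (Python) =====
-- def donchian_stop_hits(lows, n):
--     if n <= 0:
--         raise ValueError("n must be positive")
--     return [t >= n and lows[t] <= min(lows[t - n:t]) for t in range(len(lows))]
-- ===== Notes on version B (the rewrite author's own statement) =====
-- stated objective: simpler
-- what changed: Replaced the monotonic-deque sliding-window minimum plus separate prev array and second marking pass by a single comprehension that takes min() of each n-bar window directly.
import Mathlib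
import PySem

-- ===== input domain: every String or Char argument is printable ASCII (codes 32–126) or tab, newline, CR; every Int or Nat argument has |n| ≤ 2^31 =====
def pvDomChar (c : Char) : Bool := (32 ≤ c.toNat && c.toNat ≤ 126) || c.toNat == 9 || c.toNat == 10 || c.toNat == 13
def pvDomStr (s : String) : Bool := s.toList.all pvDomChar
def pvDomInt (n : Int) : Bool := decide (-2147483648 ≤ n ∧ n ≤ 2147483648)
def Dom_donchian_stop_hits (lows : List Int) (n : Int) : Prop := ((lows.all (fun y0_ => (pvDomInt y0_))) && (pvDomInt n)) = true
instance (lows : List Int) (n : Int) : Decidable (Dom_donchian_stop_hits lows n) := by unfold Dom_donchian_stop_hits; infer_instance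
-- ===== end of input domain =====

-- B replaces A's monotonic-deque sliding minimum (plus prev array and marking pass) by one
-- comprehension taking min() of each n-bar window directly: simpler, same results on n ≥ 1.

-- ===== PORT A =====
-- `while dq and dq[-1][1] >= v: dq.pop()`  (deque back = list end)
def pvPopBack : List (Int × Int) → Int → List (Int × Int)
  | [], _ => []
  | q :: qs, v =>
    if v ≤ ((q :: qs).getLast (by simp)).2 then pvPopBack (q :: qs).dropLast v else q :: qs
  termination_by dq _ => dq.length
  decreasing_by simp

-- `while dq and dq[0][0] <= i - n: dq.popleft()`  (deque front = list head)
def pvPopFront : List (Int × Int) → Int → List (Int × Int)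
  | [], _ => []
  | (k, w) :: rest, bound => if k ≤ bound then pvPopFront rest bound else (k, w) :: rest

-- one iteration of the `for i in range(m)` loop of donchian_prev_low, state = (out, dq)
def pvStepA (lows : List Int) (n m : Int)
    (st : List (Option Int) × List (Int × Int)) (i : Int) :
    List (Option Int) × List (Int × Int) :=
  let v := PySem.List.pyGetD lows i 0
  let dq := pvPopBack st.2 v
  let dq := dq ++ [(i, v)]
  let dq := pvPopFront dq (i - n)
  let t := i + 1
  let out := if t < m ∧ n - 1 ≤ i then PySem.List.pySetD st.1 t (some (dq.headD (0, 0)).2) else st.1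
  (out, dq)

def donchian_prev_low (lows : List Int) (n : Int) : List (Option Int) :=
  if n ≤ 0 then []  -- Python raises ValueError here; Pre_ excludes n ≤ 0
  else
    let m : Int := lows.length
    ((PySem.List.pyRange 0 m 1).foldl (pvStepA lows n m) (List.replicate m.toNat none, [])).1

def donchian_stop_hits (lows : List Int) (n : Int) : List Bool :=
  let prev := donchian_prev_low lows n
  let m : Int := lows.length
  (PySem.List.pyRange 0 m 1).foldl
    (fun hits t =>
      match PySem.List.pyGetD prev t none with
      | some p =>
        if PySem.List.pyGetD lows t 0 ≤ p then PySem.List.pySetD hits t true else hits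
      | none => hits)
    (List.replicate m.toNat false)

-- ===== PORT B =====
def donchian_stop_hits_alt (lows : List Int) (n : Int) : List Bool :=
  if n ≤ 0 then []  -- Python raises ValueError here; Pre_ excludes n ≤ 0
  else
    (PySem.List.pyRange 0 (lows.length : Int) 1).map (fun t =>
      if n ≤ t then
        -- `t >= n and lows[t] <= min(lows[t-n:t])` (short-circuit: min only taken when t ≥ n)
        match PySem.List.min? (PySem.List.slice lows (some (t - n)) (some t)) (fun x => x) with
        | some w => decide (PySem.List.pyGetD lows t 0 ≤ w)
        | none => false
      else false)

-- ===== PRECONDITION & SPEC =====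
-- Pre_: exactly the inputs where Python A returns (n ≤ 0 raises ValueError).
def Pre_donchian_stop_hits (_lows : List Int) (n : Int) : Prop := 1 ≤ n
instance (lows : List Int) (n : Int) : Decidable (Pre_donchian_stop_hits lows n) := by
  unfold Pre_donchian_stop_hits; infer_instance

def pvWitness_donchian_stop_hits : List Int × Int := ([3, 1, 4, 1, 5, 2], 2)

def Spec_donchian_stop_hits (lows : List Int) (n : Int) (out : List Bool) : Prop :=
  out = donchian_stop_hits_alt lows n
instance (lows : List Int) (n : Int) (out : List Bool) : Decidable (Spec_donchian_stop_hits lows n out) := by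
  unfold Spec_donchian_stop_hits; infer_instance

-- ===== CLAIM (what is proved, stated in full; the proofs are below) =====
def Claim_equal_donchian_stop_hits : Prop := ∀ (lows : List Int) (n : Int), Dom_donchian_stop_hits lows n → Pre_donchian_stop_hits lows n → Spec_donchian_stop_hits lows n (donchian_stop_hits lows n)

-- ===== LEMMAS AND PROOFS =====

theorem pvMem_dropLast_or_getLast {α : Type} (l : List α) (h : l ≠ []) (x : α) (hx : x ∈ l) :
    x ∈ l.dropLast ∨ x = l.getLast h := by
  rw [← List.dropLast_append_getLast h] at hx
  simpa using hx

theorem pvPopBack_prefix (dq : List (Int × Int)) (v : Int) : pvPopBack dq v <+: dq := by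
  induction dq, v using pvPopBack.induct with
  | case1 v => simp [pvPopBack]
  | case2 q qs v h ih =>
      rw [pvPopBack, if_pos h]
      exact ih.trans (List.dropLast_prefix _)
  | case3 q qs v h =>
      rw [pvPopBack, if_neg h]

theorem pvPopBack_not_mem (dq : List (Int × Int)) (v : Int) (p : Int × Int)
    (hp : p ∈ dq) (hn : p ∉ pvPopBack dq v) : v ≤ p.2 := by
  induction dq, v using pvPopBack.induct with
  | case1 v => simp at hp
  | case2 q qs v h ih =>
      rw [pvPopBack, if_pos h] at hn
      rcases pvMem_dropLast_or_getLast _ (by simp) _ hp with hd | he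
      · exact ih hd hn
      · rw [he]; exact h
  | case3 q qs v h =>
      rw [pvPopBack, if_neg h] at hn
      exact absurd hp hn

theorem pvPopBack_last_lt (dq : List (Int × Int)) (v : Int) :
    pvPopBack dq v = [] ∨ ∃ l x, pvPopBack dq v = l ++ [x] ∧ x.2 < v := by
  induction dq, v using pvPopBack.induct with
  | case1 v => left; rw [pvPopBack]
  | case2 q qs v hc ih =>
      rw [pvPopBack, if_pos hc]
      exact ih
  | case3 q qs v hc =>
      right
      refine ⟨(q :: qs).dropLast, (q :: qs).getLast (by simp), ?_, by omega⟩
      rw [pvPopBack, if_neg hc, List.dropLast_append_getLast]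

theorem pvPopFront_suffix (l : List (Int × Int)) (b : Int) : pvPopFront l b <:+ l := by
  induction l with
  | nil => simp [pvPopFront]
  | cons p rest ih =>
      obtain ⟨k, w⟩ := p
      rw [pvPopFront]
      split
      · exact ih.trans (List.suffix_cons _ _)
      · exact List.suffix_refl _

theorem pvPopFront_mem (l : List (Int × Int)) (b : Int) (p : Int × Int)
    (hp : p ∈ l) (hb : b < p.1) : p ∈ pvPopFront l b := by
  induction l with
  | nil => simp at hp
  | cons q rest ih =>
      obtain ⟨k, w⟩ := q
      rw [pvPopFront]
      split
      · rcases List.mem_cons.1 hp with rfl | hp'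
        · simp at hb; omega
        · exact ih hp'
      · exact hp

theorem pvPopFront_all_gt (l : List (Int × Int)) (b : Int)
    (hpw : l.Pairwise (fun p q => p.1 < q.1 ∧ p.2 < q.2)) (p : Int × Int)
    (hp : p ∈ pvPopFront l b) : b < p.1 := by
  induction l with
  | nil => simp [pvPopFront] at hp
  | cons q rest ih =>
      obtain ⟨k, w⟩ := q
      rw [pvPopFront] at hp
      rcases List.pairwise_cons.1 hpw with ⟨hq, hrest⟩
      split at hp
      · exact ih hrest hp
      · rcases List.mem_cons.1 hp with rfl | hp'
        · simpa using (by assumption : ¬ k ≤ b)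
        · have := (hq p hp').1
          simp at this ⊢
          omega

def pvDInv (lows : List Int) (nn j : Nat) (dq : List (Int × Int)) : Prop :=
  (∀ p ∈ dq, ∃ k : Nat, p.1 = (k : Int) ∧ k < j ∧ j ≤ k + nn ∧ p.2 = lows.getD k 0) ∧
  dq.Pairwise (fun p q => p.1 < q.1 ∧ p.2 < q.2) ∧
  (∀ k : Nat, k < j → j ≤ k + nn → ∃ p ∈ dq, (k : Int) ≤ p.1 ∧ p.2 ≤ lows.getD k 0)

theorem pvDStep (lows : List Int) (n : Int) (hn : 1 ≤ n) (j : Nat) (dq : List (Int × Int))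
    (h : pvDInv lows n.toNat j dq) :
    pvDInv lows n.toNat (j + 1)
      (pvPopFront (pvPopBack dq (lows.getD j 0) ++ [((j : Int), lows.getD j 0)])
        ((j : Int) - n)) := by
  have hcast : (n.toNat : Int) = n := Int.toNat_of_nonneg (by omega)
  obtain ⟨ha, hb, hd⟩ := h
  set v := lows.getD j 0 with hv
  have hkeptpre := pvPopBack_prefix dq v
  have hkept_sub : ∀ p ∈ pvPopBack dq v, p ∈ dq := fun p hp => hkeptpre.subset hp
  have hb1 : (pvPopBack dq v).Pairwise (fun p q => p.1 < q.1 ∧ p.2 < q.2) :=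
    hb.sublist hkeptpre.sublist
  have hlt : ∀ p ∈ pvPopBack dq v, p.1 < (j : Int) ∧ p.2 < v := by
    intro p hp
    obtain ⟨k, hk1, hk2, hk3, hk4⟩ := ha p (hkept_sub p hp)
    refine ⟨by rw [hk1]; exact_mod_cast hk2, ?_⟩
    rcases pvPopBack_last_lt dq v with hnil | ⟨l, x, heq, hx⟩
    · rw [hnil] at hp; simp at hp
    · rw [heq] at hp hb1
      rcases List.mem_append.1 hp with hl | hxx
      · exact lt_trans ((List.pairwise_append.1 hb1).2.2 p hl x (by simp)).2 hx
      · simp at hxx; rw [hxx]; exact hx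
  have hb2 : ((pvPopBack dq v) ++ [((j : Int), v)]).Pairwise
      (fun p q => p.1 < q.1 ∧ p.2 < q.2) := by
    rw [List.pairwise_append]
    exact ⟨hb1, by simp, fun p hp q hq => by rw [List.mem_singleton.1 hq]; exact hlt p hp⟩
  have hsuf := pvPopFront_suffix ((pvPopBack dq v) ++ [((j : Int), v)]) ((j : Int) - n)
  have hsub' : ∀ p ∈ pvPopFront ((pvPopBack dq v) ++ [((j : Int), v)]) ((j : Int) - n),
      p ∈ (pvPopBack dq v) ++ [((j : Int), v)] := fun p hp => hsuf.subset hp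
  have hgt := pvPopFront_all_gt ((pvPopBack dq v) ++ [((j : Int), v)]) ((j : Int) - n) hb2
  refine ⟨?_, hb2.sublist hsuf.sublist, ?_⟩
  · intro p hp
    rcases List.mem_append.1 (hsub' p hp) with hk | hj
    · obtain ⟨k, hk1, hk2, hk3, hk4⟩ := ha p (hkept_sub p hk)
      have hg := hgt p hp
      rw [hk1] at hg
      exact ⟨k, hk1, by omega, by omega, hk4⟩
    · have : p = ((j : Int), v) := List.mem_singleton.1 hj
      exact ⟨j, by rw [this], by omega, by omega, by rw [this]⟩
  · intro k hk1 hk2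
    by_cases hkj : k = j
    · subst hkj
      refine ⟨((k : Int), v), pvPopFront_mem _ _ _ (by simp) (by omega), le_refl _, le_refl _⟩
    · have hk1' : k < j := by omega
      obtain ⟨p, hpdq, hkp, hpv⟩ := hd k hk1' (by omega)
      by_cases hpk : p ∈ pvPopBack dq v
      · refine ⟨p, pvPopFront_mem _ _ _ (List.mem_append_left _ hpk) (by omega), hkp, hpv⟩
      · have hvp : v ≤ p.2 := pvPopBack_not_mem dq v p hpdq hpk
        refine ⟨((j : Int), v), pvPopFront_mem _ _ _ (by simp) (by omega),
          by simp; omega, le_trans hvp hpv⟩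

def pvWin (lows : List Int) (nn t : Nat) : List Int := (lows.drop (t - nn)).take nn

def pvMinW (lows : List Int) (nn t : Nat) : Int :=
  match pvWin lows nn t with
  | [] => 0
  | x :: xs => xs.foldl min x

theorem pvWin_length (lows : List Int) (nn t : Nat) (h1 : nn ≤ t) (h2 : t < lows.length) :
    (pvWin lows nn t).length = nn := by
  simp [pvWin]; omega

theorem pvWin_getElem (lows : List Int) (nn t : Nat) (h1 : nn ≤ t) (h2 : t < lows.length)
    (i : Nat) (hi : i < (pvWin lows nn t).length) :
    (pvWin lows nn t)[i] = lows.getD (t - nn + i) 0 := by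
  have hlen := pvWin_length lows nn t h1 h2
  have : t - nn + i < lows.length := by omega
  simp [pvWin, List.getElem_take, List.getElem_drop, List.getD_eq_getElem?_getD,
    List.getElem?_eq_getElem this]

theorem pvMinW_spec (lows : List Int) (nn t : Nat) (h0 : 0 < nn) (h1 : nn ≤ t)
    (h2 : t < lows.length) :
    (∃ k, k < t ∧ t ≤ k + nn ∧ pvMinW lows nn t = lows.getD k 0) ∧
    (∀ k, k < t → t ≤ k + nn → pvMinW lows nn t ≤ lows.getD k 0) := by
  have hlen := pvWin_length lows nn t h1 h2
  rcases hw : pvWin lows nn t with _ | ⟨x, xs⟩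
  · rw [hw] at hlen; simp at hlen; omega
  · have hmw : pvMinW lows nn t = xs.foldl min x := by rw [pvMinW, hw]
    constructor
    · have := PySem.List.foldl_min_mem xs x
      have hmem : xs.foldl min x ∈ pvWin lows nn t := by
        rw [hw]; rcases this with h | h
        · rw [h]; exact List.mem_cons_self
        · exact List.mem_cons_of_mem _ h
      obtain ⟨i, hi, hie⟩ := List.mem_iff_getElem.1 hmem
      refine ⟨t - nn + i, by omega, by rw [hw] at hlen; omega, ?_⟩
      rw [hmw, ← pvWin_getElem lows nn t h1 h2 i hi, hie]
    · intro k hk1 hk2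
      have hi : k - (t - nn) < (pvWin lows nn t).length := by omega
      have := pvWin_getElem lows nn t h1 h2 (k - (t - nn)) hi
      have hkk : t - nn + (k - (t - nn)) = k := by omega
      rw [hkk] at this
      have hle := PySem.List.foldl_min_le xs x
      have h : (pvWin lows nn t)[k - (t - nn)]'hi ∈ pvWin lows nn t := List.getElem_mem hi
      rw [this, hw] at h
      rw [hmw]
      rcases List.mem_cons.1 h with he | hm
      · rw [he]; exact hle.1
      · exact hle.2 _ hm

theorem pvHeadMin (lows : List Int) (n : Int) (hn : 1 ≤ n) (t : Nat)
    (h1 : n.toNat ≤ t) (h2 : t < lows.length) (dq : List (Int × Int))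
    (h : pvDInv lows n.toNat t dq) :
    (dq.headD (0, 0)).2 = pvMinW lows n.toNat t := by
  obtain ⟨ha, hb, hd⟩ := h
  have h0 : 0 < n.toNat := by omega
  obtain ⟨⟨k0, hk01, hk02, hk03⟩, hmin⟩ := pvMinW_spec lows n.toNat t h0 h1 h2
  obtain ⟨p0, hp0, _, hp0v⟩ := hd (t - 1) (by omega) (by omega)
  rcases hdq : dq with _ | ⟨q, rest⟩
  · rw [hdq] at hp0; simp at hp0
  · rw [hdq] at ha hb hd
    have hqle : ∀ p ∈ q :: rest, q.2 ≤ p.2 := by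
      intro p hp
      rcases List.mem_cons.1 hp with he | hm
      · rw [he]
      · exact le_of_lt ((List.pairwise_cons.1 hb).1 p hm).2
    simp only [List.headD_cons]
    apply le_antisymm
    · -- q.2 ≤ pvMinW: q.2 = lows.getD k 0 for window k, and pvMinW ≥ ... use hmin? No:
      -- q.2 ≤ every window value; pvMinW IS a window value (k0).
      obtain ⟨p, hpmem, _, hpv⟩ := hd k0 hk01 hk02
      calc q.2 ≤ p.2 := hqle p hpmem
        _ ≤ lows.getD k0 0 := hpv
        _ = pvMinW lows n.toNat t := hk03.symm
    · -- pvMinW ≤ q.2: q is a window value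
      obtain ⟨k, hk1, hk2, hk3, hk4⟩ := ha q List.mem_cons_self
      rw [hk4]
      exact hmin k hk2 hk3

def pvF (lows : List Int) (n : Int) (j : Nat) : List (Option Int) × List (Int × Int) :=
  (List.range j).foldl (fun st (k : Nat) => pvStepA lows n (lows.length : Int) st ((k : Nat) : Int))
    (List.replicate lows.length none, [])

def pvOutSpec (lows : List Int) (nn j : Nat) : List (Option Int) :=
  (List.range lows.length).map (fun t => if nn ≤ t ∧ t ≤ j then some (pvMinW lows nn t) else none)

theorem pvOutSpec_set (lows : List Int) (nn j : Nat) (hnn : nn ≤ j + 1) :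
    (pvOutSpec lows nn j).set (j + 1) (some (pvMinW lows nn (j + 1))) = pvOutSpec lows nn (j + 1) := by
  apply List.ext_getElem (by simp [pvOutSpec])
  intro i h1 h2
  rw [List.getElem_set]
  simp only [pvOutSpec, List.getElem_map, List.getElem_range]
  by_cases he : j + 1 = i
  · rw [if_pos he, ← he, if_pos ⟨hnn, le_refl _⟩]
  · rw [if_neg he]
    have hiff : (nn ≤ i ∧ i ≤ j) = (nn ≤ i ∧ i ≤ j + 1) :=
      propext (by constructor <;> (rintro ⟨u1, u2⟩; exact ⟨u1, by omega⟩))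
    simp only [hiff]

theorem pvOutSpec_stable (lows : List Int) (nn j : Nat)
    (h : lows.length ≤ j + 1 ∨ j + 1 < nn) :
    pvOutSpec lows nn j = pvOutSpec lows nn (j + 1) := by
  apply List.ext_getElem (by simp [pvOutSpec])
  intro i h1 h2
  simp only [pvOutSpec, List.getElem_map, List.getElem_range]
  have hil : i < lows.length := by simpa [pvOutSpec] using h1
  have hiff : (nn ≤ i ∧ i ≤ j) = (nn ≤ i ∧ i ≤ j + 1) :=
    propext (by constructor <;> (rintro ⟨u1, u2⟩; exact ⟨u1, by omega⟩))
  simp only [hiff]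

theorem pvLoopA (lows : List Int) (n : Int) (hn : 1 ≤ n) (j : Nat) (hj : j ≤ lows.length) :
    (pvF lows n j).1 = pvOutSpec lows n.toNat j ∧ pvDInv lows n.toNat j (pvF lows n j).2 := by
  induction j with
  | zero =>
      constructor
      · show List.replicate lows.length none = _
        apply List.ext_getElem (by simp [pvOutSpec])
        intro i h1 h2
        simp [pvOutSpec]
        omega
      · exact ⟨by simp [pvF], by simp [pvF], by intro k h1 h2; omega⟩
  | succ j ih =>
      obtain ⟨ihout, ihdq⟩ := ih (by omega)
      have hstep : pvF lows n (j + 1) = pvStepA lows n (lows.length : Int) (pvF lows n j) (j : Int) := by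
        rw [pvF, List.range_succ, List.foldl_append]
        rfl
      have hdq' : (pvF lows n (j + 1)).2 =
          pvPopFront (pvPopBack (pvF lows n j).2 (lows.getD j 0) ++ [((j : Int), lows.getD j 0)])
            ((j : Int) - n) := by
        rw [hstep]
        simp [pvStepA]
      have hinv' : pvDInv lows n.toNat (j + 1) (pvF lows n (j + 1)).2 := by
        rw [hdq']
        exact pvDStep lows n hn j _ ihdq
      refine ⟨?_, hinv'⟩
      rw [hstep]
      simp only [pvStepA, PySem.List.pyGetD_natCast]
      by_cases hc : ((j : Int) + 1 < (lows.length : Int) ∧ n - 1 ≤ (j : Int))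
      · rw [if_pos hc]
        have hjm : j + 1 < lows.length := by omega
        have hnn : n.toNat ≤ j + 1 := by omega
        have hhead : (((pvPopFront (pvPopBack (pvF lows n j).2 (lows.getD j 0) ++
            [((j : Int), lows.getD j 0)]) ((j : Int) - n))).headD (0, 0)).2 =
            pvMinW lows n.toNat (j + 1) := by
          apply pvHeadMin lows n hn (j + 1) hnn hjm
          rw [← hdq']
          exact hinv'
        rw [hhead, ihout]
        have hcast : ((j : Int) + 1) = ((j + 1 : Nat) : Int) := by push_cast; ring
        rw [hcast, PySem.List.pySetD_natCast]
        exact pvOutSpec_set lows n.toNat j hnn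
      · rw [if_neg hc, ihout]
        apply pvOutSpec_stable
        rcases not_and_or.1 hc with h | h
        · left; omega
        · right; omega

theorem pvWin_ne (lows : List Int) (nn t : Nat) (h0 : 0 < nn) (h2 : t < lows.length) :
    pvWin lows nn t ≠ [] := by
  apply List.ne_nil_of_length_pos
  simp [pvWin]
  omega

def pvHitsSpec (lows : List Int) (nn j : Nat) : List Bool :=
  (List.range lows.length).map
    (fun t => decide (t < j ∧ nn ≤ t ∧ lows.getD t 0 ≤ pvMinW lows nn t))

def pvG (lows : List Int) (n : Int) (j : Nat) : List Bool :=
  (List.range j).foldl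
    (fun hits (t : Nat) =>
      match PySem.List.pyGetD (pvOutSpec lows n.toNat lows.length) ((t : Nat) : Int) none with
      | some p =>
        if PySem.List.pyGetD lows ((t : Nat) : Int) 0 ≤ p then
          PySem.List.pySetD hits ((t : Nat) : Int) true
        else hits
      | none => hits)
    (List.replicate lows.length false)

theorem pvHitsSpec_step (lows : List Int) (nn j : Nat) (hj : j < lows.length) :
    pvHitsSpec lows nn (j + 1) =
      (if nn ≤ j ∧ lows.getD j 0 ≤ pvMinW lows nn j then (pvHitsSpec lows nn j).set j true
       else pvHitsSpec lows nn j) := by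
  split_ifs with hc
  · apply List.ext_getElem (by simp [pvHitsSpec])
    intro i h1 h2
    rw [List.getElem_set]
    simp only [pvHitsSpec, List.getElem_map, List.getElem_range]
    by_cases he : j = i
    · rw [if_pos he, ← he]
      have := hc.2
      rw [List.getD_eq_getElem?_getD] at this
      simp [hc.1, this]
    · rw [if_neg he]
      have hiff : (i < j ∧ nn ≤ i ∧ lows.getD i 0 ≤ pvMinW lows nn i) =
          (i < j + 1 ∧ nn ≤ i ∧ lows.getD i 0 ≤ pvMinW lows nn i) :=
        propext (by constructor <;> (rintro ⟨u1, u2⟩; exact ⟨by omega, u2⟩))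
      simp only [hiff]
  · apply List.ext_getElem (by simp [pvHitsSpec])
    intro i h1 h2
    simp only [pvHitsSpec, List.getElem_map, List.getElem_range]
    by_cases he : i = j
    · subst he
      simp only [decide_eq_decide]
      constructor
      · rintro ⟨u1, u2⟩; exact absurd u2 hc
      · rintro ⟨u1, u2⟩; omega
    · have hiff : (i < j ∧ nn ≤ i ∧ lows.getD i 0 ≤ pvMinW lows nn i) =
          (i < j + 1 ∧ nn ≤ i ∧ lows.getD i 0 ≤ pvMinW lows nn i) :=
        propext (by constructor <;> (rintro ⟨u1, u2⟩; exact ⟨by omega, u2⟩))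
      simp only [hiff]

theorem pvOutSpec_getD (lows : List Int) (nn j : Nat) (hj : j < lows.length) :
    (pvOutSpec lows nn lows.length).getD j none =
      (if nn ≤ j then some (pvMinW lows nn j) else none) := by
  have : (pvOutSpec lows nn lows.length)[j]'(by simpa [pvOutSpec] using hj) =
      (if nn ≤ j ∧ j ≤ lows.length then some (pvMinW lows nn j) else none) := by
    simp [pvOutSpec]
  rw [List.getD_eq_getElem _ _ (by simpa [pvOutSpec] using hj), this]
  have hiff : (nn ≤ j ∧ j ≤ lows.length) = (nn ≤ j) :=
    propext ⟨fun u => u.1, fun u => ⟨u, by omega⟩⟩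
  simp only [hiff]

theorem pvLoopH (lows : List Int) (n : Int) (_hn : 1 ≤ n) (j : Nat) (hj : j ≤ lows.length) :
    pvG lows n j = pvHitsSpec lows n.toNat j := by
  induction j with
  | zero =>
      show List.replicate lows.length false = _
      apply List.ext_getElem (by simp [pvHitsSpec])
      intro i h1 h2
      simp [pvHitsSpec]
  | succ j ih =>
      have hjl : j < lows.length := by omega
      have hstep : pvG lows n (j + 1) =
          (match PySem.List.pyGetD (pvOutSpec lows n.toNat lows.length) ((j : Nat) : Int) none with
           | some p =>
             if PySem.List.pyGetD lows ((j : Nat) : Int) 0 ≤ p then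
               PySem.List.pySetD (pvG lows n j) ((j : Nat) : Int) true
             else pvG lows n j
           | none => pvG lows n j) := by
        rw [pvG, List.range_succ, List.foldl_append]
        rfl
      rw [hstep, ih (by omega), pvHitsSpec_step lows n.toNat j hjl]
      by_cases h1 : n.toNat ≤ j
      · have hget : (pvOutSpec lows n.toNat lows.length).getD j none =
            some (pvMinW lows n.toNat j) := by
          rw [pvOutSpec_getD lows n.toNat j hjl, if_pos h1]
        simp only [PySem.List.pyGetD_natCast, hget]
        by_cases h2 : lows.getD j 0 ≤ pvMinW lows n.toNat j
        · rw [if_pos h2, if_pos ⟨h1, h2⟩, PySem.List.pySetD_natCast]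
        · rw [if_neg h2, if_neg (by rintro ⟨_, u⟩; exact h2 u)]
      · have hget : (pvOutSpec lows n.toNat lows.length).getD j none = none := by
          rw [pvOutSpec_getD lows n.toNat j hjl, if_neg h1]
        simp only [PySem.List.pyGetD_natCast, hget]
        rw [if_neg (by rintro ⟨u, _⟩; exact h1 u)]


theorem pvMain (lows : List Int) (n : Int) (hn : 1 ≤ n) :
    donchian_stop_hits lows n = donchian_stop_hits_alt lows n := by
  have hrange : PySem.List.pyRange 0 (lows.length : Int) 1 =
      (List.range lows.length).map (fun k : Nat => (k : Int)) := by
    rw [PySem.List.pyRange_one]; simp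
  have hprev : donchian_prev_low lows n = pvOutSpec lows n.toNat lows.length := by
    rw [donchian_prev_low, if_neg (by omega)]
    show ((PySem.List.pyRange 0 (lows.length : Int) 1).foldl (pvStepA lows n (lows.length : Int))
      (List.replicate ((lows.length : Int)).toNat none, [])).1 = _
    rw [hrange, List.foldl_map]
    have h := (pvLoopA lows n hn lows.length le_rfl).1
    simpa [pvF] using h
  have hA : donchian_stop_hits lows n = pvHitsSpec lows n.toNat lows.length := by
    show ((PySem.List.pyRange 0 (lows.length : Int) 1).foldl
      (fun hits t =>
        match PySem.List.pyGetD (donchian_prev_low lows n) t none with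
        | some p =>
          if PySem.List.pyGetD lows t 0 ≤ p then PySem.List.pySetD hits t true else hits
        | none => hits)
      (List.replicate ((lows.length : Int)).toNat false)) = _
    rw [hprev, hrange, List.foldl_map]
    have h := pvLoopH lows n hn lows.length le_rfl
    simpa [pvG] using h
  rw [hA, donchian_stop_hits_alt, if_neg (by omega), hrange, List.map_map]
  apply List.map_congr_left
  intro t ht
  have htl : t < lows.length := List.mem_range.1 ht
  simp only [Function.comp]
  by_cases h1 : n ≤ (t : Int)
  · rw [if_pos h1]
    have h1' : n.toNat ≤ t := by omega
    have hslice : PySem.List.slice lows (some ((t : Int) - n)) (some (t : Int)) =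
        pvWin lows n.toNat t := by
      rw [PySem.List.slice_toNat _ (by omega) (by omega)]
      have e1 : ((t : Int) - n).toNat = t - n.toNat := by omega
      have e2 : ((t : Int)).toNat = t := by omega
      rw [e1, e2, pvWin]
      congr 1
      omega
    rw [hslice]
    rcases hw : pvWin lows n.toNat t with _ | ⟨x, xs⟩
    · exact absurd hw (pvWin_ne lows n.toNat t (by omega) htl)
    · rw [PySem.List.min?_id_cons]
      have hmw : pvMinW lows n.toNat t = List.foldl min x xs := by rw [pvMinW, hw]
      simp only [PySem.List.pyGetD_natCast]
      simp [htl, h1', hmw]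
  · rw [if_neg h1]
    have h1' : ¬ n.toNat ≤ t := by omega
    simp [h1']

-- ===== VERDICT (by name: the statement is the Claim_ definition above) =====
theorem donchian_stop_hits_spec : Claim_equal_donchian_stop_hits := by
  intro lows n _ hp
  unfold Spec_donchian_stop_hits
  exact pvMain lows n hp
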